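-- pv_equiv track=rewrite | github.com/theexperiential/Owlette | agent/src/owlette_gui.py | map_status_to_config
-- ===== SOURCE A (Python) =====
-- def map_status_to_config(status_data, config_data):
--     id_to_status = {}
--     for pid, info in status_data.items():
--         id_ = info.get('id', None)
--         status = info.get('status', None)
--         if id_ and status:
--             id_to_status[id_] = status
--
--     for process in config_data['processes']:
--         id_ = process.get('id', None)
--         if id_:
--             process['status'] = id_to_status.get(id_, "INACTIVE")
--
--     return config_data
-- ===== SOURCE B (Python) =====
-- def map_status_to_config(status_data, config_data):
--     # Same result, no index dict: each process scans status_data directly (last match wins).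
--     for process in config_data['processes']:
--         pid = process.get('id', None)
--         if pid:
--             status = "INACTIVE"
--             for info in status_data.values():
--                 s = info.get('status', None)
--                 if info.get('id', None) == pid and s:
--                     status = s
--             process['status'] = status
--     return config_data
-- ===== Notes on version B (the rewrite author's own statement) =====
-- stated objective: alternative
-- what changed: Removed the precomputed id->status dict; each process's status is found by a direct last-wins scan over status_data, so no intermediate index structure is built.
import Mathlib
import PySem

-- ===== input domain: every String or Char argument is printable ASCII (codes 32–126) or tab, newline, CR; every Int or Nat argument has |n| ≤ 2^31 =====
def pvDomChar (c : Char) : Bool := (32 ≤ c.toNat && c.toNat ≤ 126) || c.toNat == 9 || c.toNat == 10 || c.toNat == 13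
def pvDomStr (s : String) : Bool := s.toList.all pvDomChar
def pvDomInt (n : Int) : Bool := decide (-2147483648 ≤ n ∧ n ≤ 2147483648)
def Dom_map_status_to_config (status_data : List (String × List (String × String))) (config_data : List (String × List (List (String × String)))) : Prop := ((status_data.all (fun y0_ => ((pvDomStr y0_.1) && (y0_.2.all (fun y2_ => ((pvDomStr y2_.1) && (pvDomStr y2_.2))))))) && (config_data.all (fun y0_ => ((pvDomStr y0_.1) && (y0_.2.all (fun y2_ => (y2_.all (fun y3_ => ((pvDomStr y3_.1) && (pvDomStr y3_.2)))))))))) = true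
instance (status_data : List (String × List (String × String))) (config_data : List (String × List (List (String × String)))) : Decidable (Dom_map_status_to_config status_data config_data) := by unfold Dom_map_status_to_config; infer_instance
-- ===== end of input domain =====

-- B removes A's precomputed id->status dict: each process finds its status by a direct last-wins scan of status_data (alternative decomposition, not faster). Python A/B mutate config_data in place; the claim is about the return value.
-- ===== PORT A =====
def pvTruthy : Option String → Bool
  | some s => s ≠ ""
  | none => false

def map_status_to_config (status_data : List (String × List (String × String))) (config_data : List (String × List (List (String × String)))) : List (String × List (List (String × String))) :=
  let id_to_status : PySem.Dict String String :=
    status_data.foldl (fun d pi =>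
      let id_ := PySem.Dict.get? (PySem.Dict.mk pi.2) "id"
      let status := PySem.Dict.get? (PySem.Dict.mk pi.2) "status"
      if pvTruthy id_ && pvTruthy status then d.insert (id_.getD "") (status.getD "") else d)
      PySem.Dict.empty
  match PySem.Dict.get? (PySem.Dict.mk config_data) "processes" with
  | none => config_data   -- Python raises KeyError here; excluded by Pre_
  | some procs =>
    let procs' := procs.map (fun process =>
      let id_ := PySem.Dict.get? (PySem.Dict.mk process) "id"
      if pvTruthy id_ then
        (PySem.Dict.insert (PySem.Dict.mk process) "status" (id_to_status.getD (id_.getD "") "INACTIVE")).items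
      else process)
    ((PySem.Dict.mk config_data).insert "processes" procs').items

-- ===== PORT B =====
def map_status_to_config_alt (status_data : List (String × List (String × String))) (config_data : List (String × List (List (String × String)))) : List (String × List (List (String × String))) :=
  match PySem.Dict.get? (PySem.Dict.mk config_data) "processes" with
  | none => config_data   -- Python raises KeyError here; excluded by Pre_
  | some procs =>
    let procs' := procs.map (fun process =>
      match PySem.Dict.get? (PySem.Dict.mk process) "id" with
      | some pid =>
        if pid ≠ "" then
          let status := status_data.foldl (fun st pi =>
            let s := PySem.Dict.get? (PySem.Dict.mk pi.2) "status"
            if PySem.Dict.get? (PySem.Dict.mk pi.2) "id" == some pid && pvTruthy s then s.getD st else st)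
            "INACTIVE"
          (PySem.Dict.insert (PySem.Dict.mk process) "status" status).items
        else process
      | none => process)
    ((PySem.Dict.mk config_data).insert "processes" procs').items

-- ===== PRECONDITION & SPEC =====
-- Pre_ excludes exactly the inputs where Python raises KeyError: config_data must have a "processes" key.
def Pre_map_status_to_config (status_data : List (String × List (String × String))) (config_data : List (String × List (List (String × String)))) : Prop :=
  (PySem.Dict.get? (PySem.Dict.mk config_data) "processes").isSome = true
instance (status_data : List (String × List (String × String))) (config_data : List (String × List (List (String × String)))) : Decidable (Pre_map_status_to_config status_data config_data) := by unfold Pre_map_status_to_config; infer_instance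
def pvWitness_map_status_to_config : (List (String × List (String × String))) × (List (String × List (List (String × String)))) :=
  ([("p1", [("id", "a"), ("status", "RUNNING")])], [("processes", [[("id", "a")], [("id", "")]])])

def Spec_map_status_to_config (status_data : List (String × List (String × String))) (config_data : List (String × List (List (String × String)))) (out : List (String × List (List (String × String)))) : Prop := out = map_status_to_config_alt status_data config_data
instance (status_data : List (String × List (String × String))) (config_data : List (String × List (List (String × String)))) (out : List (String × List (List (String × String)))) : Decidable (Spec_map_status_to_config status_data config_data out) := by unfold Spec_map_status_to_config; infer_instance

-- ===== CLAIM (what is proved, stated in full; the proofs are below) =====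
def Claim_equal_map_status_to_config : Prop := ∀ (status_data : List (String × List (String × String))) (config_data : List (String × List (List (String × String)))), Dom_map_status_to_config status_data config_data → Pre_map_status_to_config status_data config_data → Spec_map_status_to_config status_data config_data (map_status_to_config status_data config_data)

-- ===== LEMMAS AND PROOFS =====

-- one step of A's dict-building fold seen through getD equals one step of B's scan
lemma pv_step (pid : String) (hp : pid ≠ "") (d : PySem.Dict String String)
    (info : List (String × String)) :
    (if pvTruthy (PySem.Dict.get? (PySem.Dict.mk info) "id") && pvTruthy (PySem.Dict.get? (PySem.Dict.mk info) "status")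
      then d.insert ((PySem.Dict.get? (PySem.Dict.mk info) "id").getD "") ((PySem.Dict.get? (PySem.Dict.mk info) "status").getD "")
      else d).getD pid "INACTIVE"
    = (if (PySem.Dict.get? (PySem.Dict.mk info) "id" == some pid && pvTruthy (PySem.Dict.get? (PySem.Dict.mk info) "status"))
        then (PySem.Dict.get? (PySem.Dict.mk info) "status").getD (d.getD pid "INACTIVE")
        else d.getD pid "INACTIVE") := by
  cases hi : PySem.Dict.get? (PySem.Dict.mk info) "id" with
  | none => simp [pvTruthy]
  | some a =>
    cases hs : PySem.Dict.get? (PySem.Dict.mk info) "status" with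
    | none => simp [pvTruthy]
    | some b =>
      by_cases ha : a = ""
      · subst ha
        simp [pvTruthy, Ne.symm hp]
      · by_cases hb : b = ""
        · simp [pvTruthy, ha, hb]
        · simp only [pvTruthy, Option.getD_some, ha, hb, ne_eq, not_false_iff, decide_true,
            Bool.and_self, if_true]
          rw [PySem.Dict.getD_insert]
          by_cases h : pid = a
          · simp [h]
          · simp [h, Ne.symm h]

-- A's whole dict build, looked up at pid, equals B's scan over status_data
lemma pv_fold (pid : String) (hp : pid ≠ "") :
    ∀ (sd : List (String × List (String × String))) (d : PySem.Dict String String),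
    (sd.foldl (fun d pi =>
      let id_ := PySem.Dict.get? (PySem.Dict.mk pi.2) "id"
      let status := PySem.Dict.get? (PySem.Dict.mk pi.2) "status"
      if pvTruthy id_ && pvTruthy status then d.insert (id_.getD "") (status.getD "") else d) d).getD pid "INACTIVE"
    = sd.foldl (fun st pi =>
        let s := PySem.Dict.get? (PySem.Dict.mk pi.2) "status"
        if PySem.Dict.get? (PySem.Dict.mk pi.2) "id" == some pid && pvTruthy s then s.getD st else st)
        (d.getD pid "INACTIVE") := by
  intro sd
  induction sd with
  | nil => intro d; rfl
  | cons pi rest ih =>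
    intro d
    simp only [List.foldl_cons]
    rw [ih, pv_step pid hp d pi.2]

-- ===== VERDICT (by name: the statement is the Claim_ definition above) =====
theorem map_status_to_config_spec : Claim_equal_map_status_to_config := by
  intro status_data config_data _hdom hpre
  unfold Spec_map_status_to_config map_status_to_config map_status_to_config_alt
  cases hp : PySem.Dict.get? (PySem.Dict.mk config_data) "processes" with
  | none =>
    exfalso
    unfold Pre_map_status_to_config at hpre
    simp [hp] at hpre
  | some procs =>
    simp only []
    congr 2
    apply List.map_congr_left
    intro process _hmem
    cases hi : PySem.Dict.get? (PySem.Dict.mk process) "id" with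
    | none => simp [pvTruthy]
    | some pid =>
      by_cases hpid : pid = ""
      · simp [pvTruthy, hpid]
      · have ht : pvTruthy (some pid) = true := by simp [pvTruthy, hpid]
        simp only [ht, if_true, Option.getD_some]
        rw [pv_fold pid hpid status_data PySem.Dict.empty, PySem.Dict.getD_empty, if_pos hpid]
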